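-- pv_equiv track=rewrite | github.com/RoadrunnerWMC/wii-code-tools | lib_wii_code_tools/demangle/correct.py | findSepIdx
-- ===== SOURCE A (Python) =====
-- def findSepIdx(name, idx):
--     count = 0
--     retval = 0
--     for ch in name:
--         if ch == '<' or ch == ',':
--             if idx == count:
--                 return retval
--             count += 1
--         retval += 1
--     return -1
-- ===== SOURCE B (Python) =====
-- def findSepIdx(name, idx):
--     s = name.replace(',', '<')
--     k, base = idx, 0
--     while True:
--         pos = s.find('<')
--         if pos == -1:
--             return -1
--         if k == 0:
--             return base + pos
--         s, k, base = s[pos + 1:], k - 1, base + pos + 1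
-- ===== Notes on version B (the rewrite author's own statement) =====
-- stated objective: alternative
-- what changed: Replaces A's char-by-char counting scan by normalizing ',' to '<' with str.replace and then recursing on idx, jumping from separator to separator with str.find and slicing.
import Mathlib
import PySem

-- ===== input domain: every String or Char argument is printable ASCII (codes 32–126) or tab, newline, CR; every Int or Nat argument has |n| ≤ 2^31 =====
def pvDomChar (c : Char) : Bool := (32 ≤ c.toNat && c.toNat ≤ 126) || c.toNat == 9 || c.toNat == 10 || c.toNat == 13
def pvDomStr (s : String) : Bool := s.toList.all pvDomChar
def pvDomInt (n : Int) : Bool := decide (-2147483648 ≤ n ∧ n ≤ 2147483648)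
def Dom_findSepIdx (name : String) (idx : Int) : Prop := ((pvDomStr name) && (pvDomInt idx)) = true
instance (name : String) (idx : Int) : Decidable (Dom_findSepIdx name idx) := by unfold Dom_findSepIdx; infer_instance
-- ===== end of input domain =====

-- B replaces A's char-by-char counting scan by normalizing ',' to '<' with replace
-- and then recursing on idx, jumping separator-to-separator with find and slicing
-- (objective: alternative; a timing run measured B faster by a constant factor,
-- C-implemented str primitives replacing the per-character Python loop).


-- ===== PORT A =====
-- the for-loop of A as structural recursion over the characters, carrying count and retval
def findSepIdxGo : List Char → Int → Int → Int → Int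
  | [], _, _, _ => -1
  | ch :: rest, idx, count, retval =>
    if ch = '<' ∨ ch = ',' then
      if idx = count then retval
      else findSepIdxGo rest idx (count + 1) (retval + 1)
    else findSepIdxGo rest idx count (retval + 1)

def findSepIdx (name : String) (idx : Int) : Int :=
  findSepIdxGo name.toList idx 0 0

-- ===== PORT B =====
-- termination fact for nthSep: a found '<' lies strictly inside s
theorem find_lt_length (s : List Char) (h : PySem.Chars.find s ['<'] ≠ -1) :
    (PySem.Chars.find s ['<']).toNat < s.length := by
  have hge := PySem.Chars.neg_one_le_find s ['<']
  have h0 : 0 ≤ PySem.Chars.find s ['<'] := by omega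
  obtain ⟨t, ht⟩ := (PySem.Chars.find_spec h0).1
  have hlen : (s.drop (PySem.Chars.find s ['<']).toNat).length = 1 + t.length := by
    rw [← ht]; simp [Nat.add_comm]
  simp [List.length_drop] at hlen
  omega

-- Source B's while-loop as tail recursion on its state (s, k, base);
-- s[pos+1:] with pos ≥ 0 is exactly drop (pos+1)
def nthSep (s : List Char) (k : Int) (base : Int) : Int :=
  let pos := PySem.Chars.find s ['<']
  if h : pos = -1 then -1
  else if k = 0 then base + pos
  else nthSep (s.drop (pos.toNat + 1)) (k - 1) (base + pos + 1)
termination_by s.length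
decreasing_by
  have := find_lt_length s h
  simp [List.length_drop]
  omega

def findSepIdx_alt (name : String) (idx : Int) : Int :=
  nthSep (PySem.Chars.replace name.toList [','] ['<']) idx 0

-- ===== PRECONDITION & SPEC =====
def Spec_findSepIdx (name : String) (idx : Int) (out : Int) : Prop := out = findSepIdx_alt name idx
instance (name : String) (idx : Int) (out : Int) : Decidable (Spec_findSepIdx name idx out) := by unfold Spec_findSepIdx; infer_instance

-- ===== CLAIM (what is proved, stated in full; the proofs are below) =====
def Claim_equal_findSepIdx : Prop := ∀ (name : String) (idx : Int), Dom_findSepIdx name idx → Spec_findSepIdx name idx (findSepIdx name idx)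

-- ===== LEMMAS AND PROOFS =====

-- single-char replace is a map
def normCh (c : Char) : Char := if c = ',' then '<' else c

theorem replace_go_map (l : List Char) :
    ∀ (fuel : Nat) (acc : List Char), l.length ≤ fuel →
      PySem.Chars.replace.go [','] ['<'] fuel l acc = acc.reverse ++ l.map normCh := by
  induction l with
  | nil =>
    intro fuel acc _
    cases fuel <;> simp [PySem.Chars.replace.go]
  | cons c t ih =>
    intro fuel acc hle
    cases fuel with
    | zero => simp at hle
    | succ n =>
      rw [PySem.Chars.replace.go]
      by_cases hc : c = ','
      · subst hc
        rw [if_pos (by simp [List.isPrefixOf])]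
        rw [show List.drop ([','] : List Char).length (',' :: t) = t by simp]
        rw [ih n _ (by simp at hle ⊢; omega)]
        simp [normCh]
      · rw [if_neg (by simp [List.isPrefixOf]; exact fun h => hc h.symm)]
        rw [ih n _ (by simp at hle ⊢; omega)]
        simp [normCh, hc]

theorem replace_eq_map (l : List Char) :
    PySem.Chars.replace l [','] ['<'] = l.map normCh := by
  rw [PySem.Chars.replace]
  simp only [List.isEmpty_cons, if_false, Bool.false_eq_true]
  exact replace_go_map l l.length [] le_rfl

theorem find_cons_sep (t : List Char) : PySem.Chars.find ('<' :: t) ['<'] = 0 := by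
  rw [PySem.Chars.find, PySem.Chars.find.go, if_pos (by simp [List.isPrefixOf])]
  norm_num

-- find.go offset shift, stated via find
theorem find_go_shift (t : List Char) :
    ∀ (k : Nat), PySem.Chars.find.go ['<'] t k =
      if PySem.Chars.find t ['<'] = -1 then -1 else PySem.Chars.find t ['<'] + k := by
  induction t with
  | nil => intro k; simp [PySem.Chars.find, PySem.Chars.find.go]
  | cons c t ih =>
    intro k
    by_cases hc : c = '<'
    · subst hc
      rw [PySem.Chars.find.go, if_pos (by simp [List.isPrefixOf])]
      rw [show PySem.Chars.find ('<' :: t) ['<'] = 0 from find_cons_sep t]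
      norm_num
    · have hpre : List.isPrefixOf ['<'] (c :: t) = false := by
        simp [List.isPrefixOf]; exact fun h => hc h.symm
      rw [PySem.Chars.find.go, if_neg (by simp [hpre]), ih (k + 1)]
      rw [show PySem.Chars.find (c :: t) ['<'] =
          PySem.Chars.find.go ['<'] t 1 by
        rw [PySem.Chars.find, PySem.Chars.find.go, if_neg (by simp [hpre])]]
      rw [ih 1]
      have hge := PySem.Chars.neg_one_le_find t ['<']
      by_cases h : PySem.Chars.find t ['<'] = -1
      · simp [h]
      · rw [if_neg h, if_neg (by omega), if_neg (by omega)]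
        push_cast
        omega

theorem find_cons_other (c : Char) (t : List Char) (hc : c ≠ '<') :
    PySem.Chars.find (c :: t) ['<'] =
      if PySem.Chars.find t ['<'] = -1 then -1 else PySem.Chars.find t ['<'] + 1 := by
  rw [PySem.Chars.find, PySem.Chars.find.go,
    if_neg (by simp [List.isPrefixOf]; exact fun h => hc h.symm), find_go_shift]
  norm_num

theorem find_nil_sep : PySem.Chars.find ([] : List Char) ['<'] = -1 := by
  simp [PySem.Chars.find, PySem.Chars.find.go]

-- B's jump recursion skipped past a non-separator head
theorem nthSep_cons_other (c : Char) (t : List Char) (k base : Int) (hc : c ≠ '<') :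
    nthSep (c :: t) k base = nthSep t k (base + 1) := by
  conv_lhs => rw [nthSep]
  conv_rhs => rw [nthSep]
  simp only [find_cons_other c t hc]
  have hge := PySem.Chars.neg_one_le_find t ['<']
  by_cases h : PySem.Chars.find t ['<'] = -1
  · rw [dif_pos (by simp [h]), dif_pos h]
  · rw [dif_neg (by rw [if_neg h]; omega), dif_neg h]
    simp only [if_neg h]
    by_cases hk : k = 0
    · rw [if_pos hk, if_pos hk]; omega
    · rw [if_neg hk, if_neg hk]
      have h0 : 0 ≤ PySem.Chars.find t ['<'] := by omega
      have htoNat : (PySem.Chars.find t ['<'] + 1).toNat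
          = (PySem.Chars.find t ['<']).toNat + 1 := by omega
      rw [htoNat]
      simp only [List.drop_succ_cons]
      congr 1
      omega

-- main invariant: A's scan from (count, retval) = B's jump recursion on the
-- normalized remainder with k = idx - count, base = retval
theorem scan_eq_jump (cs : List Char) :
    ∀ (idx count retval : Int),
      findSepIdxGo cs idx count retval = nthSep (cs.map normCh) (idx - count) retval := by
  induction cs with
  | nil =>
    intro idx count retval
    rw [findSepIdxGo, List.map_nil, nthSep, dif_pos find_nil_sep]
  | cons c t ih =>
    intro idx count retval
    by_cases hc : c = '<' ∨ c = ','
    · have hmap : normCh c = '<' := by rcases hc with h | h <;> simp [normCh, h]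
      rw [findSepIdxGo, if_pos hc, List.map_cons, hmap, nthSep]
      simp only [find_cons_sep]
      rw [dif_neg (by norm_num)]
      by_cases he : idx = count
      · rw [if_pos he, if_pos (by omega)]; omega
      · rw [if_neg he, if_neg (by omega : ¬ (idx - count = 0))]
        simp only [Int.toNat_zero, Nat.zero_add, List.drop_succ_cons, List.drop_zero]
        rw [ih idx (count + 1) (retval + 1)]
        congr 1 <;> omega
    · push_neg at hc
      have hmap : normCh c = c := by simp [normCh, hc.2]
      rw [findSepIdxGo, if_neg (by tauto), List.map_cons, hmap,
        nthSep_cons_other c _ _ _ hc.1, ih]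

-- ===== VERDICT (by name: the statement is the Claim_ definition above) =====
theorem findSepIdx_spec : Claim_equal_findSepIdx := by
  intro name idx _
  unfold Spec_findSepIdx findSepIdx findSepIdx_alt
  rw [replace_eq_map, scan_eq_jump]
  norm_num
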